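-- pv_equiv track=rewrite | github.com/AndresFWilT/MisionTIC-2022_C1 | venv/Scripts/reto_2MINTIC2022c1.py | Nick
-- ===== SOURCE A (Python) =====
-- def Nick(e,p):
--     arreglo = "";
--     punt = 0;
--     for i in range(len(p)):
--         if (p[i] in e):
--             punt += 1;
--             arreglo += str(punt)+" ";
--         else:
--             arreglo += str(punt)+" ";
--     return arreglo;
-- ===== SOURCE B (Python) =====
-- def Nick(e, p):
--     # Skip-to-next-match: find each next matching position, render whole
--     # constant-count blocks at once by string repetition.
--     parts = []
--     rest, v = p, 0
--     while True:
--         i = next((j for j, c in enumerate(rest) if c in e), None)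
--         if i is None:
--             parts.append((str(v) + ' ') * len(rest))
--             return ''.join(parts)
--         parts.append((str(v) + ' ') * i + str(v + 1) + ' ')
--         rest, v = rest[i + 1:], v + 1
-- ===== Notes on version B (the rewrite author's own statement) =====
-- stated objective: alternative
-- what changed: Instead of A's per-character loop that increments a counter and concatenates one number at a time, B jumps from one matching position to the next (a find over the remaining string) and renders each constant-count block in one shot by string repetition ('(str(v)+" ")*i'), joining the blocks at the end.
import Mathlib
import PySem

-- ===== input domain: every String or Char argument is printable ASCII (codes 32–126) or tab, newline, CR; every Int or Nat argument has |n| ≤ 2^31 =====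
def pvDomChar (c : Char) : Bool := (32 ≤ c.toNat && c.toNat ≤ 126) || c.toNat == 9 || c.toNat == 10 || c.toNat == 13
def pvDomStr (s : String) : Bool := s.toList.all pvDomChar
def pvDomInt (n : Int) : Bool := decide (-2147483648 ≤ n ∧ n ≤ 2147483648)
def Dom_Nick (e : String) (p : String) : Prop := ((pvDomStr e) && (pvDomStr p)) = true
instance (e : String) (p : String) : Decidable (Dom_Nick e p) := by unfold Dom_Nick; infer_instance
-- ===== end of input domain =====

-- B skips from match to match, rendering each constant-count block at once by repetition (alternative decomposition, same cost).


-- ===== PORT A =====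
def Nick (e : String) (p : String) : String :=
  -- per-character loop: counter punt and accumulated chars; 'p[i] in e' is membership in e
  String.ofList (p.toList.foldl (fun (st : Int × List Char) c =>
    if c ∈ e.toList then
      (st.1 + 1, st.2 ++ PySem.Int.toChars (st.1 + 1) ++ [' '])
    else
      (st.1, st.2 ++ PySem.Int.toChars st.1 ++ [' '])) (0, [])).2

-- ===== PORT B =====
-- Source B's while-loop over a shrinking 'rest' is transcribed as this recursion on rest:
-- find the next matching index, emit the whole constant block by repetition, recurse past it.
def NickGo (e : List Char) (rest : List Char) (v : Int) : List Char :=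
  match h : rest.findIdx? (fun c => decide (c ∈ e)) with
  | none => (List.replicate rest.length (PySem.Int.toChars v ++ [' '])).flatten
  | some i =>
      (List.replicate i (PySem.Int.toChars v ++ [' '])).flatten ++
        (PySem.Int.toChars (v + 1) ++ [' ']) ++ NickGo e (rest.drop (i + 1)) (v + 1)
termination_by rest.length
decreasing_by
  have := (List.findIdx?_eq_some_iff_findIdx_eq.mp h).1
  simp [List.length_drop]; omega

def Nick_alt (e : String) (p : String) : String :=
  String.ofList (NickGo e.toList p.toList 0)

-- ===== PRECONDITION & SPEC =====
def Spec_Nick (e : String) (p : String) (out : String) : Prop := out = Nick_alt e p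
instance (e : String) (p : String) (out : String) : Decidable (Spec_Nick e p out) := by unfold Spec_Nick; infer_instance

-- ===== CLAIM (what is proved, stated in full; the proofs are below) =====
def Claim_equal_Nick : Prop := ∀ (e : String) (p : String), Dom_Nick e p → Spec_Nick e p (Nick e p)

-- ===== LEMMAS AND PROOFS =====

lemma nickGo_nil (e : List Char) (v : Int) : NickGo e [] v = [] := by
  rw [NickGo]; simp

-- one step of B's block recursion, seen per character
lemma nickGo_none (e : List Char) (rest : List Char) (v : Int)
    (h : rest.findIdx? (fun c => decide (c ∈ e)) = none) :
    NickGo e rest v = (List.replicate rest.length (PySem.Int.toChars v ++ [' '])).flatten := by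
  rw [NickGo]; split <;> simp_all

lemma nickGo_some (e : List Char) (rest : List Char) (v : Int) (i : Nat)
    (h : rest.findIdx? (fun c => decide (c ∈ e)) = some i) :
    NickGo e rest v = (List.replicate i (PySem.Int.toChars v ++ [' '])).flatten ++
      (PySem.Int.toChars (v + 1) ++ [' ']) ++ NickGo e (rest.drop (i + 1)) (v + 1) := by
  rw [NickGo]; split <;> simp_all

-- one step of B's block recursion, seen per character
lemma nickGo_cons (e : List Char) (c : Char) (t : List Char) (v : Int) :
    NickGo e (c :: t) v =
      if c ∈ e then
        PySem.Int.toChars (v + 1) ++ [' '] ++ NickGo e t (v + 1)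
      else
        PySem.Int.toChars v ++ [' '] ++ NickGo e t v := by
  by_cases hc : c ∈ e
  · have h : List.findIdx? (fun x => decide (x ∈ e)) (c :: t) = some 0 := by
      simp [List.findIdx?_cons, hc]
    rw [nickGo_some e (c :: t) v 0 h]
    simp [hc]
  · rcases ht : List.findIdx? (fun x => decide (x ∈ e)) t with _ | i
    · have h : List.findIdx? (fun x => decide (x ∈ e)) (c :: t) = none := by
        simp [List.findIdx?_cons, hc, ht]
      rw [if_neg hc, nickGo_none e (c :: t) v h, nickGo_none e t v ht]
      simp [List.replicate_succ]
    · have h : List.findIdx? (fun x => decide (x ∈ e)) (c :: t) = some (i + 1) := by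
        simp [List.findIdx?_cons, hc, ht]
      rw [if_neg hc, nickGo_some e (c :: t) v (i + 1) h, nickGo_some e t v i ht]
      simp [List.replicate_succ, List.append_assoc]

lemma nick_main (e : String) (l : List Char) (punt : Int) (acc : List Char) :
    (l.foldl (fun (st : Int × List Char) c =>
      if c ∈ e.toList then
        (st.1 + 1, st.2 ++ PySem.Int.toChars (st.1 + 1) ++ [' '])
      else
        (st.1, st.2 ++ PySem.Int.toChars st.1 ++ [' '])) (punt, acc)).2
    = acc ++ NickGo e.toList l punt := by
  induction l generalizing punt acc with
  | nil => simp [nickGo_nil]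
  | cons c t ih =>
    by_cases h : c ∈ e.toList <;>
      simp only [List.foldl_cons, h, ite_true, ite_false, nickGo_cons] <;>
      rw [ih] <;>
      simp [List.append_assoc]

-- ===== VERDICT (by name: the statement is the Claim_ definition above) =====
theorem Nick_spec : Claim_equal_Nick := by
  intro e p _
  unfold Spec_Nick Nick Nick_alt
  rw [nick_main]
  simp
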